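-- pv_equiv track=rewrite | github.com/wunzt/row_puzzle | row_puzzle.py | rec_row_puzzle
-- ===== SOURCE A (Python) =====
-- def rec_row_puzzle(num_row, token, visited):
--     """Helper function for row_puzzle."""
--     if token + 1 == len(num_row):
--         return True
--
--     if token + num_row[token] + 1 <= len(num_row):
--         new_token = token + num_row[token]
--         if new_token not in visited:
--             visited.append(new_token)
--             stepping = rec_row_puzzle(num_row, new_token, visited)
--             if stepping is not False:
--                 token += num_row[token]
--                 return stepping
--
--     if token - num_row[token] >= 0:
--         new_token = token - num_row[token]
--         if new_token not in visited:
--             visited.append(new_token)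
--             stepping = rec_row_puzzle(num_row, new_token, visited)
--             if stepping is not False:
--                 token -= num_row[token]
--                 return stepping
--
--     return False
-- ===== SOURCE B (Python) =====
-- def rec_row_puzzle(num_row, token, visited):
--     """Iterative DFS with an explicit stack of (token, phase) frames instead of recursion."""
--     n = len(num_row)
--     stack = [(token, 0)]
--     while stack:
--         t, phase = stack.pop()
--         if t + 1 == n:
--             return True
--         if phase == 0:
--             stack.append((t, 1))
--             forward = t + num_row[t]
--             if forward + 1 <= n and forward not in visited:
--                 visited.append(forward)
--                 stack.append((forward, 0))
--         elif phase == 1: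
--             stack.append((t, 2))
--             backward = t - num_row[t]
--             if backward >= 0 and backward not in visited:
--                 visited.append(backward)
--                 stack.append((backward, 0))
--         # phase 2: both directions exhausted; the frame stays popped
--     return False
-- ===== Notes on version B (the rewrite author's own statement) =====
-- stated objective: alternative
-- what changed: Replaces A's recursion by an iterative DFS over an explicit stack of (token, phase) frames (phase 0 = try forward, 1 = try backward, 2 = exhausted), with identical discovery/append order on visited.
-- outside the precondition, e.g. on rec_row_puzzle([2, -1, 0], 1, []): A returns True, B returns True; on rec_row_puzzle([1, 1], -1, []): A returns True, B returns True
import Mathlib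
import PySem

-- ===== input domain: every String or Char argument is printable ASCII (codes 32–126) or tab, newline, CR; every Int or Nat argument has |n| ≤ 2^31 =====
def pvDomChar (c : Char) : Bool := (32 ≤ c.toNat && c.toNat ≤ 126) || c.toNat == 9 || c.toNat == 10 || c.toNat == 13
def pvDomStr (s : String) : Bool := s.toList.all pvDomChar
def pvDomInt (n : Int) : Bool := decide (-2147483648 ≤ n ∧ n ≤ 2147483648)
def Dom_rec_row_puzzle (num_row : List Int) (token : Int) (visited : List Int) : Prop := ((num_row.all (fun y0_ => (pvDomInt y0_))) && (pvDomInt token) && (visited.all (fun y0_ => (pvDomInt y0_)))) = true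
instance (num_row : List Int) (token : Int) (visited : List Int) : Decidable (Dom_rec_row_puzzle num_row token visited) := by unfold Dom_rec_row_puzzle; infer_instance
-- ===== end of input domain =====

-- B replaces A's recursion by an iterative DFS over an explicit stack of (token, phase) frames
-- (alternative decomposition, same cost); both mutate `visited` identically, the claim is about the return value.

-- ===== PORT A =====
-- recursion of A, threading the mutated `visited`; the Nat argument is a totality fuel guard
-- (proved sufficient inside Pre_ below); none = exception or exhausted fuel.
def recA (num_row : List Int) : Nat → Int → List Int → Option (Bool × List Int)
  | 0, _, _ => none
  | fuel+1, token, visited =>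
    if token + 1 = (num_row.length : Int) then some (true, visited)
    else
      match PySem.List.pyGet? num_row token with
      | none => none
      | some v =>
        match (if token + v + 1 ≤ (num_row.length : Int) ∧ (token + v) ∉ visited
               then recA num_row fuel (token + v) (visited ++ [token + v])
               else some (false, visited)) with
        | none => none
        | some (true, vis1) => some (true, vis1)
        | some (false, vis1) =>
          if 0 ≤ token - v ∧ (token - v) ∉ vis1
          then recA num_row fuel (token - v) (vis1 ++ [token - v])
          else some (false, vis1)

def rec_row_puzzle (num_row : List Int) (token : Int) (visited : List Int) : Bool :=
  ((recA num_row (num_row.length + 2) token visited).getD (false, visited)).1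

-- ===== PORT B =====
-- the while-loop of Source B: stack of (token, phase) frames; the Nat argument is a totality fuel
-- guard (proved sufficient inside Pre_ below); none = exception or exhausted fuel.
def stepB (num_row : List Int) : Nat → List (Int × Nat) → List Int → Option Bool
  | 0, _, _ => none
  | _+1, [], _ => some false
  | fuel+1, (t, phase) :: rest, vis =>
    if t + 1 = (num_row.length : Int) then some true
    else if phase = 0 then
      match PySem.List.pyGet? num_row t with
      | none => none
      | some v =>
        if t + v + 1 ≤ (num_row.length : Int) ∧ (t + v) ∉ vis
        then stepB num_row fuel ((t + v, 0) :: (t, 1) :: rest) (vis ++ [t + v])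
        else stepB num_row fuel ((t, 1) :: rest) vis
    else if phase = 1 then
      match PySem.List.pyGet? num_row t with
      | none => none
      | some v =>
        if 0 ≤ t - v ∧ (t - v) ∉ vis
        then stepB num_row fuel ((t - v, 0) :: (t, 2) :: rest) (vis ++ [t - v])
        else stepB num_row fuel ((t, 2) :: rest) vis
    else stepB num_row fuel rest vis

def rec_row_puzzle_alt (num_row : List Int) (token : Int) (visited : List Int) : Bool :=
  (stepB num_row (3 * (num_row.length + 1) + 1) [(token, 0)] visited).getD false

-- ===== PRECONDITION & SPEC =====
-- Pre_ excludes tokens outside [0, len) and rows with negative entries (except the immediate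
-- `token + 1 == len` success, which reads nothing): there A either raises IndexError at some
-- point of the run — which a closed-form condition cannot separate from the returning runs —
-- or returns only via Python's negative-index wraparound.
def Pre_rec_row_puzzle (num_row : List Int) (token : Int) (visited : List Int) : Prop :=
  token + 1 = (num_row.length : Int) ∨
    (0 ≤ token ∧ token < (num_row.length : Int) ∧ ∀ v ∈ num_row, 0 ≤ v)
instance (num_row : List Int) (token : Int) (visited : List Int) : Decidable (Pre_rec_row_puzzle num_row token visited) := by unfold Pre_rec_row_puzzle; infer_instance

def pvWitness_rec_row_puzzle : List Int × Int × List Int := ([1, 1, 2, 0], 0, [])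

def Spec_rec_row_puzzle (num_row : List Int) (token : Int) (visited : List Int) (out : Bool) : Prop := out = rec_row_puzzle_alt num_row token visited
instance (num_row : List Int) (token : Int) (visited : List Int) (out : Bool) : Decidable (Spec_rec_row_puzzle num_row token visited out) := by unfold Spec_rec_row_puzzle; infer_instance

-- ===== CLAIM (what is proved, stated in full; the proofs are below) =====
def Claim_equal_rec_row_puzzle : Prop := ∀ (num_row : List Int) (token : Int) (visited : List Int), Dom_rec_row_puzzle num_row token visited → Pre_rec_row_puzzle num_row token visited → Spec_rec_row_puzzle num_row token visited (rec_row_puzzle num_row token visited)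

-- ===== LEMMAS AND PROOFS =====

-- the in-range indices not yet in `visited` (fuel measure for sufficiency)
def pvFree (num_row : List Int) (vis : List Int) : Finset ℕ :=
  (Finset.range num_row.length).filter (fun i => ¬ ((i : Int) ∈ vis))

theorem pvFree_append (num_row : List Int) (vis : List Int) (x : Int) (hx0 : 0 ≤ x) :
    pvFree num_row (vis ++ [x]) = (pvFree num_row vis).erase x.toNat := by
  ext i
  simp only [pvFree, Finset.mem_filter, Finset.mem_erase, Finset.mem_range, List.mem_append,
    List.mem_singleton]
  constructor
  · rintro ⟨hin, hni⟩
    push Not at hni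
    refine ⟨fun h => hni.2 ?_, hin, hni.1⟩
    subst h; exact (Int.toNat_of_nonneg hx0).symm ▸ rfl
  · rintro ⟨hne, hin, hni⟩
    refine ⟨hin, ?_⟩
    push Not
    refine ⟨hni, fun h => hne ?_⟩
    omega

theorem pvFree_mem (num_row : List Int) (vis : List Int) (x : Int)
    (hx0 : 0 ≤ x) (hxn : x < (num_row.length : Int)) (hxv : x ∉ vis) :
    x.toNat ∈ pvFree num_row vis := by
  simp only [pvFree, Finset.mem_filter, Finset.mem_range]
  constructor
  · omega
  · rw [Int.toNat_of_nonneg hx0]; exact hxv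

-- recA only appends to visited
theorem recA_len (num_row : List Int) : ∀ (fuel : Nat) (t : Int) (vis : List Int) (b : Bool)
    (vis' : List Int), recA num_row fuel t vis = some (b, vis') → vis.length ≤ vis'.length := by
  intro fuel
  induction fuel with
  | zero => intro t vis b vis' h; simp [recA] at h
  | succ fuel ih =>
    intro t vis b vis' h
    simp only [recA] at h
    split at h
    · simp only [Option.some.injEq, Prod.mk.injEq] at h
      rw [h.2]
    · split at h
      · simp at h
      · rename_i v hv
        split at h
        · simp at h
        · rename_i vis1 heq
          simp only [Option.some.injEq, Prod.mk.injEq] at h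
          have h1 : vis.length ≤ vis1.length := by
            split at heq
            · have := ih _ _ _ _ heq
              simp at this; omega
            · simp only [Option.some.injEq, Prod.mk.injEq] at heq
              rw [heq.2]
          rw [← h.2]; exact h1
        · rename_i vis1 heq
          have h1 : vis.length ≤ vis1.length := by
            split at heq
            · have := ih _ _ _ _ heq
              simp at this; omega
            · simp only [Option.some.injEq, Prod.mk.injEq] at heq
              rw [heq.2]
          split at h
          · have := ih _ _ _ _ h
            simp at this; omega
          · simp only [Option.some.injEq, Prod.mk.injEq] at h
            rw [← h.2]; exact h1

-- sufficiency: inside Pre_'s main branch, fuel `card (pvFree) + 1` makes recA return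
theorem recA_suff (num_row : List Int) (hnn : ∀ v ∈ num_row, 0 ≤ v) :
    ∀ (fuel : Nat) (t : Int) (vis : List Int),
      0 ≤ t → t < (num_row.length : Int) →
      (pvFree num_row vis).card + 1 ≤ fuel →
      ∃ (b : Bool) (vis' : List Int),
        recA num_row fuel t vis = some (b, vis') ∧
        vis'.length + (pvFree num_row vis').card ≤ vis.length + (pvFree num_row vis).card ∧
        pvFree num_row vis' ⊆ pvFree num_row vis := by
  intro fuel
  induction fuel with
  | zero => intro t vis _ _ hfuel; omega
  | succ fuel ih =>
    intro t vis ht0 htn hfuel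
    by_cases hEnd : t + 1 = (num_row.length : Int)
    · exact ⟨true, vis, by simp only [recA, if_pos hEnd], le_refl _, subset_rfl⟩
    · obtain ⟨v, hget⟩ : ∃ v, PySem.List.pyGet? num_row t = some v := by
        cases h : PySem.List.pyGet? num_row t with
        | some v => exact ⟨v, rfl⟩
        | none =>
          rw [PySem.List.pyGet?_eq_none_iff] at h
          exact absurd (by simp [PySem.Raise.InRange]; omega) h
      have hv0 : (0:Int) ≤ v := hnn v (PySem.List.mem_of_pyGet?_eq_some _ hget)
      by_cases hF : t + v + 1 ≤ (num_row.length : Int) ∧ (t + v) ∉ vis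
      · -- forward step taken
        have hf0 : (0:Int) ≤ t + v := by omega
        have hfn : t + v < (num_row.length : Int) := by omega
        have e1 := pvFree_append num_row vis (t + v) hf0
        have m1 := pvFree_mem num_row vis (t + v) hf0 hfn hF.2
        have cpos1 : 1 ≤ (pvFree num_row vis).card := Finset.card_pos.mpr ⟨_, m1⟩
        have c1 : (pvFree num_row (vis ++ [t + v])).card + 1 = (pvFree num_row vis).card := by
          rw [e1, Finset.card_erase_of_mem m1]; omega
        obtain ⟨b1, vis1, hrec1, hlen1, hsub1⟩ :=
          ih (t + v) (vis ++ [t + v]) hf0 hfn (by omega)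
        have hsub1' : pvFree num_row vis1 ⊆ pvFree num_row vis := by
          refine hsub1.trans ?_
          rw [e1]; exact Finset.erase_subset _ _
        have hlenap : (vis ++ [t + v]).length = vis.length + 1 := by simp
        cases b1 with
        | true =>
          refine ⟨true, vis1, ?_, by omega, hsub1'⟩
          simp only [recA, if_neg hEnd, hget, if_pos hF, hrec1]
        | false =>
          by_cases hB : 0 ≤ t - v ∧ (t - v) ∉ vis1
          · have hbn : t - v < (num_row.length : Int) := by omega
            have e2 := pvFree_append num_row vis1 (t - v) hB.1
            have m2 := pvFree_mem num_row vis1 (t - v) hB.1 hbn hB.2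
            have cpos2 : 1 ≤ (pvFree num_row vis1).card := Finset.card_pos.mpr ⟨_, m2⟩
            have c2 : (pvFree num_row (vis1 ++ [t - v])).card + 1 = (pvFree num_row vis1).card := by
              rw [e2, Finset.card_erase_of_mem m2]; omega
            have hcard1 : (pvFree num_row vis1).card + 1 ≤ (pvFree num_row vis).card := by
              have := Finset.card_le_card (hsub1.trans (le_of_eq e1))
              rw [Finset.card_erase_of_mem m1] at this
              omega
            obtain ⟨b2, vis2, hrec2, hlen2, hsub2⟩ :=
              ih (t - v) (vis1 ++ [t - v]) hB.1 hbn (by omega)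
            refine ⟨b2, vis2, ?_, by simp at hlen2; omega, ?_⟩
            · simp only [recA, if_neg hEnd, hget, if_pos hF, hrec1, if_pos hB, hrec2]
            · refine hsub2.trans ?_
              refine (le_of_eq e2).trans ?_
              exact (Finset.erase_subset _ _).trans hsub1'
          · refine ⟨false, vis1, ?_, by omega, hsub1'⟩
            simp only [recA, if_neg hEnd, hget, if_pos hF, hrec1, if_neg hB]
      · -- no forward step
        by_cases hB : 0 ≤ t - v ∧ (t - v) ∉ vis
        · have hbn : t - v < (num_row.length : Int) := by omega
          have e2 := pvFree_append num_row vis (t - v) hB.1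
          have m2 := pvFree_mem num_row vis (t - v) hB.1 hbn hB.2
          have cpos2 : 1 ≤ (pvFree num_row vis).card := Finset.card_pos.mpr ⟨_, m2⟩
          have c2 : (pvFree num_row (vis ++ [t - v])).card + 1 = (pvFree num_row vis).card := by
            rw [e2, Finset.card_erase_of_mem m2]; omega
          obtain ⟨b2, vis2, hrec2, hlen2, hsub2⟩ :=
            ih (t - v) (vis ++ [t - v]) hB.1 hbn (by omega)
          refine ⟨b2, vis2, ?_, by simp at hlen2; omega, ?_⟩
          · simp only [recA, if_neg hEnd, hget, if_neg hF, if_pos hB, hrec2]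
          · refine hsub2.trans ?_
            refine (le_of_eq e2).trans ?_
            exact Finset.erase_subset _ _
        · refine ⟨false, vis, ?_, le_refl _, subset_rfl⟩
          simp only [recA, if_neg hEnd, hget, if_neg hF, if_neg hB]

-- one machine step of stepB, by phase
theorem stepB_phase0 (num_row : List Int) (fuel : Nat) (t : Int) (rest : List (Int × Nat))
    (vis : List Int) (v : Int) (hEnd : ¬ t + 1 = (num_row.length : Int))
    (hget : PySem.List.pyGet? num_row t = some v) :
    stepB num_row (fuel + 1) ((t, 0) :: rest) vis =
      (if t + v + 1 ≤ (num_row.length : Int) ∧ (t + v) ∉ vis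
       then stepB num_row fuel ((t + v, 0) :: (t, 1) :: rest) (vis ++ [t + v])
       else stepB num_row fuel ((t, 1) :: rest) vis) := by
  simp [stepB, hEnd, hget]

theorem stepB_phase1 (num_row : List Int) (fuel : Nat) (t : Int) (rest : List (Int × Nat))
    (vis : List Int) (v : Int) (hEnd : ¬ t + 1 = (num_row.length : Int))
    (hget : PySem.List.pyGet? num_row t = some v) :
    stepB num_row (fuel + 1) ((t, 1) :: rest) vis =
      (if 0 ≤ t - v ∧ (t - v) ∉ vis
       then stepB num_row fuel ((t - v, 0) :: (t, 2) :: rest) (vis ++ [t - v])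
       else stepB num_row fuel ((t, 2) :: rest) vis) := by
  simp [stepB, hEnd, hget]

theorem stepB_phase2 (num_row : List Int) (fuel : Nat) (t : Int) (rest : List (Int × Nat))
    (vis : List Int) (hEnd : ¬ t + 1 = (num_row.length : Int)) :
    stepB num_row (fuel + 1) ((t, 2) :: rest) vis = stepB num_row fuel rest vis := by
  simp [stepB, hEnd]

-- simulation: the stack machine of B runs A's recursion frame by frame
theorem stepB_sim (num_row : List Int) : ∀ (fuel : Nat) (t : Int) (vis : List Int) (b : Bool)
    (vis' : List Int), recA num_row fuel t vis = some (b, vis') →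
    ∃ c : Nat, c ≤ 3 * (vis'.length - vis.length) + 3 ∧
      ∀ (rest : List (Int × Nat)) (F : Nat),
        stepB num_row (c + F) ((t, 0) :: rest) vis =
          (if b then some true else stepB num_row F rest vis') := by
  intro fuel
  induction fuel with
  | zero => intro t vis b vis' h; simp [recA] at h
  | succ fuel ih =>
    intro t vis b vis' h
    simp only [recA] at h
    split at h
    · -- token + 1 = len: immediate success
      rename_i hEnd
      simp only [Option.some.injEq, Prod.mk.injEq] at h
      refine ⟨1, by omega, fun rest F => ?_⟩
      rw [show 1 + F = F + 1 from by omega, ← h.1]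
      simp [stepB, hEnd]
    · rename_i hEnd
      split at h
      · simp at h
      · rename_i v hget
        split at h
        · simp at h
        · -- forward child succeeded
          rename_i vis1 heq
          simp only [Option.some.injEq, Prod.mk.injEq] at h
          obtain ⟨hb, hv'⟩ := h
          subst hv'
          split at heq
          · rename_i hF
            have hlen1 := recA_len num_row fuel _ _ _ _ heq
            simp only [List.length_append, List.length_cons, List.length_nil] at hlen1
            obtain ⟨c1, hc1, hsim1⟩ := ih _ _ _ _ heq
            have hsim1' : ∀ rest F, stepB num_row (c1 + F) ((t + v, 0) :: rest) (vis ++ [t + v]) = some true := by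
              intro r f; simpa using hsim1 r f
            refine ⟨c1 + 1, ?_, fun rest F => ?_⟩
            · simp only [List.length_append, List.length_cons, List.length_nil] at hc1
              omega
            · rw [show c1 + 1 + F = (c1 + F) + 1 from by omega,
                stepB_phase0 num_row _ t rest vis v hEnd hget, if_pos hF,
                hsim1' ((t, 1) :: rest) F, ← hb]
              simp
          · rename_i hF
            simp at heq
        · -- forward gave false (or was not taken); backward decides
          rename_i vis1 heq
          -- first bring the machine to ((t,1)::rest) with visited vis1, consuming c1+1
          have hstage : ∃ c1 : Nat, c1 + 1 ≤ 3 * (vis1.length - vis.length) + 1 ∧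
              vis.length ≤ vis1.length ∧
              ∀ (rest : List (Int × Nat)) (F : Nat),
                stepB num_row (c1 + 1 + F) ((t, 0) :: rest) vis =
                  stepB num_row F ((t, 1) :: rest) vis1 := by
            split at heq
            · rename_i hF
              have hlen1 := recA_len num_row fuel _ _ _ _ heq
              simp only [List.length_append, List.length_cons, List.length_nil] at hlen1
              obtain ⟨c1, hc1, hsim1⟩ := ih _ _ _ _ heq
              have hsim1' : ∀ rest F, stepB num_row (c1 + F) ((t + v, 0) :: rest) (vis ++ [t + v]) = stepB num_row F rest vis1 := by
                intro r f; simpa using hsim1 r f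
              refine ⟨c1, ?_, by omega, fun rest F => ?_⟩
              · simp only [List.length_append, List.length_cons, List.length_nil] at hc1
                omega
              · rw [show c1 + 1 + F = (c1 + F) + 1 from by omega,
                  stepB_phase0 num_row _ t rest vis v hEnd hget, if_pos hF,
                  hsim1' ((t, 1) :: rest) F]
            · rename_i hF
              simp only [Option.some.injEq, Prod.mk.injEq] at heq
              refine ⟨0, by omega, by rw [heq.2], fun rest F => ?_⟩
              rw [show 0 + 1 + F = F + 1 from by omega,
                stepB_phase0 num_row _ t rest vis v hEnd hget, if_neg hF, heq.2]
          obtain ⟨c1, hc1, hlen1, hstage1⟩ := hstage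
          split at h
          · -- backward child taken
            rename_i hB
            have hlen2 := recA_len num_row fuel _ _ _ _ h
            simp only [List.length_append, List.length_cons, List.length_nil] at hlen2
            obtain ⟨c2, hc2, hsim2⟩ := ih _ _ _ _ h
            refine ⟨c1 + c2 + 3, ?_, fun rest F => ?_⟩
            · simp only [List.length_append, List.length_cons, List.length_nil] at hc2
              omega
            · rw [show c1 + c2 + 3 + F = c1 + 1 + (c2 + F + 2) from by omega,
                hstage1 rest (c2 + F + 2),
                show c2 + F + 2 = (c2 + (F + 1)) + 1 from by omega,
                stepB_phase1 num_row _ t rest vis1 v hEnd hget, if_pos hB,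
                hsim2 ((t, 2) :: rest) (F + 1)]
              cases b with
              | true => simp
              | false =>
                simp only [Bool.false_eq_true, if_false]
                rw [stepB_phase2 num_row _ t rest vis' hEnd]
          · -- backward not taken: overall false
            rename_i hB
            simp only [Option.some.injEq, Prod.mk.injEq] at h
            obtain ⟨hb, hv'⟩ := h
            subst hv'
            refine ⟨c1 + 3, ?_, fun rest F => ?_⟩
            · omega
            · rw [show c1 + 3 + F = c1 + 1 + (F + 1 + 1) from by omega,
                hstage1 rest (F + 1 + 1),
                stepB_phase1 num_row _ t rest vis1 v hEnd hget, if_neg hB,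
                stepB_phase2 num_row _ t rest vis1 hEnd, ← hb]
              simp

-- ===== VERDICT (by name: the statement is the Claim_ definition above) =====
theorem rec_row_puzzle_spec : Claim_equal_rec_row_puzzle := by
  intro num_row token visited _ hpre
  unfold Spec_rec_row_puzzle rec_row_puzzle rec_row_puzzle_alt
  rcases hpre with hEnd | ⟨ht0, htn, hnn⟩
  · -- immediate success on both sides
    have hA : recA num_row (num_row.length + 2) token visited = some (true, visited) := by
      rw [show num_row.length + 2 = (num_row.length + 1) + 1 from rfl]
      simp [recA, hEnd]
    have hB : stepB num_row (3 * (num_row.length + 1) + 1) [(token, 0)] visited = some true := by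
      simp [stepB, hEnd]
    rw [hA, hB]
    rfl
  · have hcard : (pvFree num_row visited).card ≤ num_row.length := by
      calc (pvFree num_row visited).card
          ≤ (Finset.range num_row.length).card :=
            Finset.card_le_card (Finset.filter_subset _ _)
        _ = num_row.length := Finset.card_range _
    obtain ⟨b, vis', hrec, hlen, hsub⟩ :=
      recA_suff num_row hnn (num_row.length + 2) token visited ht0 htn (by omega)
    obtain ⟨c, hc, hsim⟩ := stepB_sim num_row _ _ _ _ _ hrec
    have hlenmono := recA_len num_row _ _ _ _ _ hrec
    have hcF : c ≤ 3 * num_row.length + 3 := by omega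
    have hsplit : 3 * (num_row.length + 1) + 1 = c + (3 * (num_row.length + 1) + 1 - c) := by
      omega
    rw [hrec, hsplit, hsim [] (3 * (num_row.length + 1) + 1 - c)]
    cases b with
    | true => rfl
    | false =>
      have hpos : 3 * (num_row.length + 1) + 1 - c = (3 * (num_row.length + 1) - c) + 1 := by
        omega
      rw [if_neg (by simp), hpos]
      simp [stepB]
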